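-- pv_equiv track=rewrite | github.com/vadim-zyamalov/advent-of-code | 2015/day-24/part1.py | permute_presents_3
-- ===== SOURCE A (Python) =====
-- from itertools import combinations
--
-- def permute_presents_3(presents, start=1):
--     goal_weight = sum(presents) // 3
--     max_group = len(presents) // 3
--     assert goal_weight * 3 == sum(presents)
--     stop_gr0 = False
--     for i in range(start, max_group + 1):
--         for gr0 in combinations(presents, i):
--             if sum(gr0) != goal_weight:
--                 continue
--             tmp_presents = [p for p in presents if p not in gr0]
--             for j in range(len(gr0), len(tmp_presents) // 2 + 1):
--                 stop_gr1 = False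
--                 for gr1 in combinations(tmp_presents, j):
--                     if sum(gr1) == goal_weight:
--                         stop_gr0 = True
--                         stop_gr1 = True
--                         yield gr0
--                         break
--                 if stop_gr1:
--                     break
--         if stop_gr0:
--             break
-- ===== SOURCE B (Python) =====
-- def permute_presents_3(presents, start=1):
--     # gr0 via size-pruned recursive enumeration; feasibility via subset-sum DP over (count, sum).
--     total = sum(presents)
--     goal = total // 3
--     assert goal * 3 == total
--     n = len(presents)
--
--     def pick(rest, need, t):
--         # subsets of rest with exactly `need` elements summing to t, index-lexicographic
--         if need == 0:
--             return [[]] if t == 0 else []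
--         if len(rest) < need:
--             return []
--         x, xs = rest[0], rest[1:]
--         return [[x] + g for g in pick(xs, need - 1, t - x)] + pick(xs, need, t)
--
--     def feasible(i, gr0):
--         tmp = [p for p in presents if p not in gr0]
--         cap = len(tmp) // 2
--         dp = [{0}] + [set() for _ in range(cap)]
--         for x in tmp:
--             dp = [dp[0]] + [dp[c] | {s + x for s in dp[c - 1]} for c in range(1, cap + 1)]
--         return any(goal in dp[j] for j in range(i, cap + 1))
--
--     for i in range(start, n // 3 + 1):
--         good = [tuple(g) for g in pick(presents, i, goal) if feasible(i, g)]
--         if good: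
--             yield from good
--             return
-- ===== Notes on version B (the rewrite author's own statement) =====
-- stated objective: alternative
-- what changed: B replaces A's inner partition-existence search (nested combinations enumerations per candidate group) by a subset-sum DP over (count, sum), and enumerates candidate groups by a pruned choose/skip recursion instead of filtering itertools.combinations; the feasibility check drops from exponential to polynomial, though the candidate enumeration itself stays exponential, so no overall speed is claimed.
import Mathlib
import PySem

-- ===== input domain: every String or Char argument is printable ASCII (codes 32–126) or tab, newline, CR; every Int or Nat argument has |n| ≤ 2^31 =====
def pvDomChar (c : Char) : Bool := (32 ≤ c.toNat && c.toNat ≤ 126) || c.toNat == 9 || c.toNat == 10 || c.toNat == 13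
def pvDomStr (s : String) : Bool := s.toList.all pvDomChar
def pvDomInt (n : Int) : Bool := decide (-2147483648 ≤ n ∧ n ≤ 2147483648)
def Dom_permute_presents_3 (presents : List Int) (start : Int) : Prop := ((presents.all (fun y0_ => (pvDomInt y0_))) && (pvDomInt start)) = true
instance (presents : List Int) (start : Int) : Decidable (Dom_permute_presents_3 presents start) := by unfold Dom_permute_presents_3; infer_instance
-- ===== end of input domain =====

-- B replaces the per-candidate nested combinations feasibility search by a subset-sum DP over
-- (count, sum) and enumerates candidate groups by a pruned recursion (objective: alternative).

-- ===== PORT A =====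
def pvStepA (presents : List Int) (goal : Int) (st : List (List Int) × Bool) (i : Int) :
    List (List Int) × Bool :=
  if st.2 then st
  else
    (PySem.List.combinations presents i.toNat).foldl (fun st gr0 =>
      if gr0.sum ≠ goal then st
      else
        let tmp := presents.filter (fun p => !(gr0.contains p))
        let found := (PySem.List.pyRange (gr0.length : Int)
            (PySem.Int.floordiv (tmp.length : Int) 2 + 1) 1).foldl
          (fun (f : Bool) (j : Int) =>
            if f then f
            else (PySem.List.combinations tmp j.toNat).foldl
              (fun (g : Bool) gr1 => if g then g else (gr1.sum == goal)) false) false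
        if found then (st.1 ++ [gr0], true) else st) st

def permute_presents_3 (presents : List Int) (start : Int) : List (List Int) :=
  let goal := PySem.Int.floordiv presents.sum 3
  let maxg := PySem.Int.floordiv (presents.length : Int) 3
  ((PySem.List.pyRange start (maxg + 1) 1).foldl (pvStepA presents goal) ([], false)).1

-- ===== PORT B =====
def pvPick : List Int → Nat → Int → List (List Int)
  | _, 0, t => if t = 0 then [[]] else []
  | [], _ + 1, _ => []
  | x :: xs, n + 1, t =>
    if xs.length + 1 < n + 1 then []
    else (pvPick xs n (t - x)).map (x :: ·) ++ pvPick xs (n + 1) t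

def pvDpZip (x : Int) (prev : PySem.Set Int) : List (PySem.Set Int) → List (PySem.Set Int)
  | [] => []
  | d :: ds => PySem.Set.union d (prev.map (· + x)) :: pvDpZip x d ds

def pvDpStep (x : Int) (dp : List (PySem.Set Int)) : List (PySem.Set Int) :=
  match dp with
  | [] => []
  | d0 :: rest => d0 :: pvDpZip x d0 rest

def pvFeasible (presents : List Int) (goal : Int) (i : Int) (gr0 : List Int) : Bool :=
  let tmp := presents.filter (fun p => !(gr0.contains p))
  let cap := tmp.length / 2
  let dp0 : List (PySem.Set Int) :=
    PySem.Set.ofList [0] :: List.replicate cap PySem.Set.empty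
  let dp := tmp.foldl (fun dp x => pvDpStep x dp) dp0
  (PySem.List.pyRange i ((cap : Int) + 1) 1).any
    (fun j => PySem.Set.contains (dp.getD j.toNat PySem.Set.empty) goal)

def pvAltLoop (presents : List Int) (goal : Int) : List Int → List (List Int)
  | [] => []
  | i :: is =>
    let good := (pvPick presents i.toNat goal).filter (pvFeasible presents goal i)
    if good.isEmpty then pvAltLoop presents goal is else good

def permute_presents_3_alt (presents : List Int) (start : Int) : List (List Int) :=
  let goal := PySem.Int.floordiv presents.sum 3
  pvAltLoop presents goal
    (PySem.List.pyRange start (PySem.Int.floordiv (presents.length : Int) 3 + 1) 1)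

-- ===== PRECONDITION & SPEC =====
-- A's `assert` raises AssertionError when sum(presents) is not divisible by 3, and
-- `combinations(presents, i)` raises ValueError for a negative size when start < 0.
def Pre_permute_presents_3 (presents : List Int) (start : Int) : Prop :=
  PySem.Int.mod presents.sum 3 = 0 ∧ 0 ≤ start
instance (presents : List Int) (start : Int) : Decidable (Pre_permute_presents_3 presents start) := by
  unfold Pre_permute_presents_3; infer_instance
def pvWitness_permute_presents_3 : List Int × Int := ([1, 2, 3], 1)

def Spec_permute_presents_3 (presents : List Int) (start : Int) (out : List (List Int)) : Prop := out = permute_presents_3_alt presents start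
instance (presents : List Int) (start : Int) (out : List (List Int)) : Decidable (Spec_permute_presents_3 presents start out) := by unfold Spec_permute_presents_3; infer_instance

-- ===== CLAIM (what is proved, stated in full; the proofs are below) =====
def Claim_equal_permute_presents_3 : Prop := ∀ (presents : List Int) (start : Int), Dom_permute_presents_3 presents start → Pre_permute_presents_3 presents start → Spec_permute_presents_3 presents start (permute_presents_3 presents start)

-- ===== LEMMAS AND PROOFS =====

-- A's inner "exists a second group" check, named so it can be reasoned about.
def pvFoundA (presents : List Int) (goal : Int) (gr0 : List Int) : Bool :=
  let tmp := presents.filter (fun p => !(gr0.contains p))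
  (PySem.List.pyRange (gr0.length : Int)
      (PySem.Int.floordiv (tmp.length : Int) 2 + 1) 1).foldl
    (fun (f : Bool) (j : Int) =>
      if f then f
      else (PySem.List.combinations tmp j.toNat).foldl
        (fun (g : Bool) gr1 => if g then g else (gr1.sum == goal)) false) false

-- the predicate A's size-i pass filters by
def pvQ (presents : List Int) (goal : Int) (g : List Int) : Bool :=
  (g.sum == goal) && pvFoundA presents goal g

-- "s is the sum of a length-c sub-multiset of l"
def pvReach (l : List Int) (c : Nat) (s : Int) : Prop :=
  ∃ g : List Int, g.Sublist l ∧ g.length = c ∧ g.sum = s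

-- break-with-flag loop = List.any
theorem pv_foldl_flag {α : Type} (f : α → Bool) :
    ∀ (L : List α) (b : Bool), L.foldl (fun b a => if b then b else f a) b = (b || L.any f) := by
  intro L
  induction L with
  | nil => intro b; simp
  | cons x xs ih =>
    intro b
    rw [List.foldl_cons, ih]
    cases b <;> simp [List.any_cons]

theorem pv_pick_eq (l : List Int) :
    ∀ (k : Nat) (t : Int), pvPick l k t = (PySem.List.combinations l k).filter (fun g => g.sum == t) := by
  induction l with
  | nil =>
    intro k t
    cases k with
    | zero =>
      by_cases h : t = 0
      · subst h; simp [pvPick, PySem.List.combinations_zero, List.filter]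
      · simp [pvPick, PySem.List.combinations_zero, List.filter, h, Ne.symm h]
    | succ n => simp [pvPick, PySem.List.combinations_nil_succ]
  | cons x xs ih =>
    intro k t
    cases k with
    | zero =>
      by_cases h : t = 0
      · subst h; simp [pvPick, PySem.List.combinations_zero, List.filter]
      · simp [pvPick, PySem.List.combinations_zero, List.filter, h, Ne.symm h]
    | succ n =>
      by_cases h : xs.length + 1 < n + 1
      · have hnil : PySem.List.combinations (x :: xs) (n + 1) = [] :=
          PySem.List.combinations_eq_nil_of_length_lt (x :: xs) (by simp; omega)
        rw [pvPick, if_pos h, hnil]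
        simp
      · rw [pvPick, if_neg h, PySem.List.combinations_cons_succ, List.filter_append,
          List.filter_map, ih n (t - x), ih (n + 1) t]
        congr 1
        congr 1
        apply List.filter_congr
        intro g _
        apply Bool.coe_iff_coe.mp
        simp [Function.comp, List.sum_cons]
        omega

theorem pv_dpZip_length (x : Int) (prev : PySem.Set Int) (ds : List (PySem.Set Int)) :
    (pvDpZip x prev ds).length = ds.length := by
  induction ds generalizing prev with
  | nil => rfl
  | cons d ds ih => simp [pvDpZip, ih]

theorem pv_dpStep_length (x : Int) (dp : List (PySem.Set Int)) :
    (pvDpStep x dp).length = dp.length := by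
  cases dp with
  | nil => rfl
  | cons d0 rest => simp [pvDpStep, pv_dpZip_length]

theorem pv_dp_fold_length (l : List Int) :
    ∀ dp : List (PySem.Set Int),
      (l.foldl (fun dp x => pvDpStep x dp) dp).length = dp.length := by
  induction l with
  | nil => intro dp; rfl
  | cons x xs ih => intro dp; rw [List.foldl_cons, ih, pv_dpStep_length]

theorem pv_dpZip_getD (x : Int) :
    ∀ (ds : List (PySem.Set Int)) (prev : PySem.Set Int) (c : Nat), c < ds.length →
      (pvDpZip x prev ds).getD c PySem.Set.empty =
        PySem.Set.union (ds.getD c PySem.Set.empty)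
          (((if c = 0 then prev else ds.getD (c - 1) PySem.Set.empty)).map (· + x)) := by
  intro ds
  induction ds with
  | nil => intro prev c h; simp at h
  | cons d ds ih =>
    intro prev c h
    cases c with
    | zero => simp [pvDpZip]
    | succ c' =>
      simp only [pvDpZip, List.getD_cons_succ]
      rw [ih d c' (by simpa using h)]
      cases c' with
      | zero => simp
      | succ c'' => simp

theorem pv_dpStep_getD (x : Int) (dp : List (PySem.Set Int)) (c : Nat) (h : c < dp.length) :
    (pvDpStep x dp).getD c PySem.Set.empty =
      if c = 0 then dp.getD 0 PySem.Set.empty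
      else PySem.Set.union (dp.getD c PySem.Set.empty)
        ((dp.getD (c - 1) PySem.Set.empty).map (· + x)) := by
  cases dp with
  | nil => simp at h
  | cons d0 rest =>
    cases c with
    | zero => simp [pvDpStep]
    | succ c' =>
      simp only [pvDpStep, List.getD_cons_succ, if_neg (Nat.succ_ne_zero c')]
      rw [pv_dpZip_getD x rest d0 c' (by simpa using h)]
      cases c' with
      | zero => simp
      | succ c'' => simp

theorem pv_reach_zero (l : List Int) (s : Int) : pvReach l 0 s ↔ s = 0 := by
  constructor
  · rintro ⟨g, _, hlen, hsum⟩
    rw [List.length_eq_zero_iff] at hlen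
    subst hlen; simpa using hsum.symm
  · rintro rfl; exact ⟨[], List.nil_sublist l, rfl, rfl⟩

theorem pv_sublist_concat (g l : List Int) (a : Int) :
    g.Sublist (l ++ [a]) ↔ g.Sublist l ∨ ∃ g', g = g' ++ [a] ∧ g'.Sublist l := by
  constructor
  · intro h
    rcases (List.sublist_append_iff.mp h) with ⟨u, v, rfl, hu, hv⟩
    rcases List.sublist_singleton.mp hv with rfl | rfl
    · exact Or.inl (by simpa using hu)
    · exact Or.inr ⟨u, rfl, hu⟩
  · rintro (h | ⟨g', rfl, h⟩)
    · exact h.trans (List.sublist_append_left _ _)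
    · exact (h.append_right _).trans (by simp)

theorem pv_reach_concat (l : List Int) (a : Int) (c : Nat) (s : Int) :
    pvReach (l ++ [a]) (c + 1) s ↔ pvReach l (c + 1) s ∨ pvReach l c (s - a) := by
  constructor
  · rintro ⟨g, hsub, hlen, hsum⟩
    rcases (pv_sublist_concat g l a).mp hsub with h | ⟨g', rfl, h⟩
    · exact Or.inl ⟨g, h, hlen, hsum⟩
    · refine Or.inr ⟨g', h, by simpa using hlen, ?_⟩
      simp at hsum; omega
  · rintro (⟨g, hsub, hlen, hsum⟩ | ⟨g, hsub, hlen, hsum⟩)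
    · exact ⟨g, hsub.trans (List.sublist_append_left _ _), hlen, hsum⟩
    · exact ⟨g ++ [a], (pv_sublist_concat _ l a).mpr (Or.inr ⟨g, rfl, hsub⟩),
        by simp [hlen], by simp; omega⟩

theorem pv_dp_inv :
    ∀ (l : List Int) (dp : List (PySem.Set Int)) (l0 : List Int),
      (∀ c, c < dp.length → ∀ s, s ∈ dp.getD c PySem.Set.empty ↔ pvReach l0 c s) →
      ∀ c, c < (l.foldl (fun dp x => pvDpStep x dp) dp).length →
        ∀ s, s ∈ (l.foldl (fun dp x => pvDpStep x dp) dp).getD c PySem.Set.empty ↔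
          pvReach (l0 ++ l) c s := by
  intro l
  induction l with
  | nil => intro dp l0 h c hc s; simpa using h c (by simpa using hc) s
  | cons x xs ih =>
    intro dp l0 h c hc s
    have h2 : ∀ c, c < (pvDpStep x dp).length →
        ∀ s, s ∈ (pvDpStep x dp).getD c PySem.Set.empty ↔ pvReach (l0 ++ [x]) c s := by
      intro c hc s
      rw [pv_dpStep_length] at hc
      rw [pv_dpStep_getD x dp c hc]
      cases c with
      | zero => simpa [pv_reach_zero] using h 0 hc s
      | succ c' =>
        rw [if_neg (Nat.succ_ne_zero c'), PySem.Set.mem_union, pv_reach_concat]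
        have hc' : c' < dp.length := by omega
        rw [h (c' + 1) hc]
        constructor
        · rintro (hl | hr)
          · exact Or.inl hl
          · rcases List.mem_map.mp hr with ⟨u, hu, rfl⟩
            have : u + x - x = u := by ring
            exact Or.inr (by simpa [this] using (h c' hc' u).mp hu)
        · rintro (hl | hr)
          · exact Or.inl hl
          · exact Or.inr (List.mem_map.mpr ⟨s - x, (h c' hc' (s - x)).mpr hr, by ring⟩)
    have := ih (pvDpStep x dp) (l0 ++ [x]) h2 c (by simpa using hc) s
    simpa using this

-- initial table: only the empty subset is reachable
theorem pv_dp0_inv (cap : Nat) :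
    ∀ c, c < (PySem.Set.ofList [(0:Int)] :: List.replicate cap PySem.Set.empty).length →
      ∀ s : Int, s ∈ (PySem.Set.ofList [(0:Int)] :: List.replicate cap PySem.Set.empty).getD c PySem.Set.empty ↔
        pvReach [] c s := by
  intro c _hc s
  cases c with
  | zero => simp [pv_reach_zero, PySem.Set.mem_ofList]
  | succ c' =>
    simp only [List.getD_cons_succ]
    constructor
    · intro hmem
      exfalso
      have hd : (List.replicate cap (PySem.Set.empty : PySem.Set Int)).getD c' PySem.Set.empty
          = PySem.Set.empty := by
        simp [List.getD]
      rw [hd] at hmem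
      simp [PySem.Set.empty] at hmem
    · rintro ⟨g, hsub, hlen, _⟩
      have := List.sublist_nil.mp hsub
      subst this; simp at hlen

-- pvFoundA as a double any-search
theorem pv_foundA_eq_any (presents : List Int) (goal : Int) (gr0 : List Int) :
    pvFoundA presents goal gr0 =
      (PySem.List.pyRange (gr0.length : Int)
          ((((presents.filter (fun p => !(gr0.contains p))).length / 2 : Nat) : Int) + 1) 1).any
        (fun j => (PySem.List.combinations (presents.filter (fun p => !(gr0.contains p))) j.toNat).any
          (fun gr1 => gr1.sum == goal)) := by
  unfold pvFoundA
  have hfd : PySem.Int.floordiv (((presents.filter (fun p => !(gr0.contains p))).length : Nat) : Int) 2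
      = (((presents.filter (fun p => !(gr0.contains p))).length / 2 : Nat) : Int) := by
    exact_mod_cast PySem.Int.floordiv_natCast (presents.filter (fun p => !(gr0.contains p))).length 2
  simp only [hfd, pv_foldl_flag, Bool.false_or]

-- the generic "append matching element and raise the flag" loop
theorem pv_foldl_pairs (P : List Int → Bool) :
    ∀ (L : List (List Int)) (out : List (List Int)) (b : Bool),
      L.foldl (fun (st : List (List Int) × Bool) g =>
          if P g then (st.1 ++ [g], true) else st) (out, b)
        = (out ++ L.filter P, b || !(L.filter P).isEmpty) := by
  intro L
  induction L with
  | nil => intro out b; simp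
  | cons g L ih =>
    intro out b
    rw [List.foldl_cons]
    by_cases h : P g = true
    · rw [if_pos h, ih, List.filter_cons_of_pos h]
      simp
    · rw [if_neg h, ih, List.filter_cons_of_neg (by simpa using h)]

-- A's size-i pass
theorem pv_stepA_eq (presents : List Int) (goal : Int) (out : List (List Int)) (i : Int) :
    pvStepA presents goal (out, false) i
      = (out ++ (PySem.List.combinations presents i.toNat).filter (pvQ presents goal),
         !((PySem.List.combinations presents i.toNat).filter (pvQ presents goal)).isEmpty) := by
  rw [pvStepA]
  simp only [if_neg (by simp : ¬((out, false) : List (List Int) × Bool).2 = true)]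
  have hbody : (fun (st : List (List Int) × Bool) gr0 =>
      if gr0.sum ≠ goal then st
      else
        let tmp := presents.filter (fun p => !(gr0.contains p))
        let found := (PySem.List.pyRange (gr0.length : Int)
            (PySem.Int.floordiv (tmp.length : Int) 2 + 1) 1).foldl
          (fun (f : Bool) (j : Int) =>
            if f then f
            else (PySem.List.combinations tmp j.toNat).foldl
              (fun (g : Bool) gr1 => if g then g else (gr1.sum == goal)) false) false
        if found then (st.1 ++ [gr0], true) else st)
      = (fun st g => if pvQ presents goal g then (st.1 ++ [g], true) else st) := by
    funext st g
    show (if g.sum ≠ goal then st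
        else if pvFoundA presents goal g then (st.1 ++ [g], true) else st)
      = (if pvQ presents goal g then (st.1 ++ [g], true) else st)
    by_cases hs : g.sum = goal
    · rw [if_neg (by simp [hs])]
      by_cases hf : pvFoundA presents goal g = true
      · rw [if_pos hf, if_pos (by simp [pvQ, hs, hf])]
      · rw [if_neg hf, if_neg (by simp [pvQ, hf])]
    · rw [if_pos hs, if_neg (by simp [pvQ, hs])]
  rw [hbody, pv_foldl_pairs]
  simp

theorem pv_stopped (presents : List Int) (goal : Int) :
    ∀ (rs : List Int) (st : List (List Int) × Bool), st.2 = true →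
      rs.foldl (pvStepA presents goal) st = st := by
  intro rs
  induction rs with
  | nil => intro st _; rfl
  | cons r rs ih =>
    intro st h
    rw [List.foldl_cons, pvStepA, if_pos h]
    exact ih st h

theorem pv_outer (presents : List Int) (goal : Int) :
    ∀ (rs : List Int) (out : List (List Int)),
      (∀ i ∈ rs, (PySem.List.combinations presents i.toNat).filter (pvQ presents goal)
        = (pvPick presents i.toNat goal).filter (pvFeasible presents goal i)) →
      ((rs.foldl (pvStepA presents goal) (out, false)).1
        = out ++ pvAltLoop presents goal rs) := by
  intro rs
  induction rs with
  | nil => intro out _; simp [pvAltLoop]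
  | cons i rs ih =>
    intro out h
    rw [List.foldl_cons, pv_stepA_eq, h i List.mem_cons_self]
    rw [pvAltLoop]
    by_cases he : ((pvPick presents i.toNat goal).filter (pvFeasible presents goal i)).isEmpty = true
    · rw [List.isEmpty_iff] at he
      rw [he]
      simp only [List.isEmpty_nil, Bool.not_true, List.append_nil]
      rw [ih out (fun j hj => h j (List.mem_cons_of_mem i hj))]
      simp
    · rw [(by simpa using he : ((pvPick presents i.toNat goal).filter (pvFeasible presents goal i)).isEmpty = false)]
      simp only [Bool.not_false]
      rw [pv_stopped presents goal rs _ rfl]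
      simp

-- A's second-group search agrees with B's DP feasibility test
theorem pv_feasible_eq (presents : List Int) (goal : Int) (i : Int) (gr0 : List Int)
    (hi : 0 ≤ i) (hlen : gr0.length = i.toNat) :
    pvFoundA presents goal gr0 = pvFeasible presents goal i gr0 := by
  rw [pv_foundA_eq_any]
  unfold pvFeasible
  have hcast : ((gr0.length : Nat) : Int) = i := by rw [hlen]; omega
  rw [hcast]
  apply Bool.coe_iff_coe.mp
  simp only [List.any_eq_true]
  constructor
  · rintro ⟨j, hj, g, hg, hsum⟩
    refine ⟨j, hj, ?_⟩
    rw [PySem.List.mem_pyRange_one] at hj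
    rcases (PySem.List.mem_combinations_iff _ _ _).mp hg with ⟨hsub, hglen⟩
    rw [PySem.Set.contains_iff, pv_dp_inv _ _ [] (pv_dp0_inv _) j.toNat
      (by rw [pv_dp_fold_length]; simp only [List.length_cons, List.length_replicate]; omega)]
    exact ⟨g, by simpa using hsub, hglen, by simpa using hsum⟩
  · rintro ⟨j, hj, hin⟩
    refine ⟨j, hj, ?_⟩
    rw [PySem.List.mem_pyRange_one] at hj
    rw [PySem.Set.contains_iff, pv_dp_inv _ _ [] (pv_dp0_inv _) j.toNat
      (by rw [pv_dp_fold_length]; simp only [List.length_cons, List.length_replicate]; omega)] at hin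
    rcases hin with ⟨g, hsub, hglen, hsum⟩
    exact ⟨g, (PySem.List.mem_combinations_iff _ _ _).mpr ⟨by simpa using hsub, hglen⟩, by simp [hsum]⟩

-- the two per-size candidate lists coincide
theorem pv_lists_eq (presents : List Int) (goal : Int) (i : Int) (hi : 0 ≤ i) :
    (PySem.List.combinations presents i.toNat).filter (pvQ presents goal)
      = (pvPick presents i.toNat goal).filter (pvFeasible presents goal i) := by
  rw [pv_pick_eq, List.filter_filter]
  apply List.filter_congr
  intro g hg
  have hlen : g.length = i.toNat := PySem.List.length_of_mem_combinations hg
  rw [pvQ, pv_feasible_eq presents goal i g hi hlen, Bool.and_comm]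

-- ===== VERDICT (by name: the statement is the Claim_ definition above) =====
theorem permute_presents_3_spec : Claim_equal_permute_presents_3 := by
  intro presents start _hdom hpre
  unfold Spec_permute_presents_3 permute_presents_3 permute_presents_3_alt
  rw [pv_outer presents (PySem.Int.floordiv presents.sum 3) _ []]
  · simp
  · intro i hi
    rw [PySem.List.mem_pyRange_one] at hi
    exact pv_lists_eq presents _ i (le_trans hpre.2 hi.1)
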